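-- pv_equiv track=rewrite | github.com/dimuthk/Dimuth_Projects | ChordLyr/extract_prog.py | extract
-- ===== SOURCE A (Python) =====
-- def extract(chords):
-- 	progs = {}
-- 	groups = chords
--
-- 	'''
-- 	for i in range(1,4):
-- 		groups = zip(groups, chords[i:])
-- 		for i in range(len(groups)):
-- 			#flatten
-- 			tmp = tuple()
-- 			for chord in groups[i]:
-- 				if type(chord) == tuple:
-- 					tmp += tuple([el for el in chord])
-- 				else:
-- 					tmp += (chord,)
-- 			groups[i] = tmp
-- 			#groups[i] = tuple([el for tup in groups[i] for el in tup])
-- 			progs[groups[i]] = progs.get(groups[i],0) + 1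
-- 	'''
--
-- 	groups = zip(chords,chords[1:],chords[2:],chords[3:])
-- 	for group in groups:
-- 		group = tuple(group)
-- 		progs[group] = progs.get(group,0)+1
-- 	choices = {}
-- 	for prog,cnt in progs.items():
-- 		if cnt > 1:
-- 			choices[cnt] = choices.get(cnt,list()) + [prog]
--
-- 	if len(choices.items()) == 0:
-- 		return ("",)
-- 	choices_ord = sorted(choices.items(), key=lambda k:k[0], reverse=True)
-- 	first = max(choices_ord[0][1], key=lambda prog:len(prog))
-- 	for cnt,progs in choices_ord:
-- 		best = max(progs, key=lambda prog: len(prog))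
-- 		if len(best) > 2:
-- 			return best
-- 	return first
-- ===== SOURCE B (Python) =====
-- def extract(chords):
--     # Same result as A: the earliest 4-gram whose multiplicity is maximal and > 1, else ("",).
--     grams = [tuple(chords[i:i+4]) for i in range(len(chords) - 3)]
--     best = ("",)
--     best_cnt = 1
--     for g in grams:
--         c = grams.count(g)
--         if c > best_cnt:
--             best, best_cnt = g, c
--     return best
-- ===== Notes on version B (the rewrite author's own statement) =====
-- stated objective: simpler
-- what changed: A builds a 4-gram count dict, regroups it into a count->grams dict, sorts the groups by count descending and scans them with an early return; B makes the 4-gram list once and does a single left-to-right scan keeping a strictly-improving running best whose multiplicity is recomputed with list.count (no dicts, no sort).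
import Mathlib
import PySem

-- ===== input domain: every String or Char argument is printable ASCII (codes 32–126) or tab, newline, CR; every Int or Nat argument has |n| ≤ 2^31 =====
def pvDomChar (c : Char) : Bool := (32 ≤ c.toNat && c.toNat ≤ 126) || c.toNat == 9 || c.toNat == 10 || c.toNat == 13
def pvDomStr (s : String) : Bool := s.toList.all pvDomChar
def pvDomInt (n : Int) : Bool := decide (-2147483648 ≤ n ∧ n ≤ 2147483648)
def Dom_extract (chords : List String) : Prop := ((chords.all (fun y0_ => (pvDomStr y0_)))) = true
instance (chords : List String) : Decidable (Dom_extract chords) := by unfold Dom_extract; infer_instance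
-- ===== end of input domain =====

-- B replaces A's count dict + count-grouping dict + descending sort + early-return scan by one
-- left-to-right scan of the 4-gram list that keeps a strictly-improving running best (count via list.count).

-- ===== PORT A =====

-- zip(xs, ys, zs, ws): Python's 4-ary zip, each 4-tuple as a 4-element list (hand port; exact)
def pvZip4 {α : Type} : List α → List α → List α → List α → List (List α)
  | a :: as, b :: bs, c :: cs, d :: ds => [a, b, c, d] :: pvZip4 as bs cs ds
  | _, _, _, _ => []

-- A's final 'for cnt,progs in choices_ord:' loop with its early return; falls through to 'first'
def pvExtractLoop (first : List String) : List (Int × List (List String)) → List String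
  | [] => first
  | (_, progs) :: rest =>
    let best := PySem.List.maxD progs (fun prog => prog.length) []
    if 2 < best.length then best else pvExtractLoop first rest

def extract (chords : List String) : List String :=
  let groups := pvZip4 chords (PySem.List.slice chords (some 1) none)
      (PySem.List.slice chords (some 2) none) (PySem.List.slice chords (some 3) none)
  let progs : PySem.Dict (List String) Int :=
    groups.foldl (fun d group => d.insert group (d.getD group 0 + 1)) PySem.Dict.empty
  let choices : PySem.Dict Int (List (List String)) :=
    progs.items.foldl
      (fun ch p => if 1 < p.2 then ch.insert p.2 (ch.getD p.2 [] ++ [p.1]) else ch)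
      PySem.Dict.empty
  if choices.items.length = 0 then [""]
  else
    let choices_ord := PySem.List.sorted choices.items (fun k => k.1) true
    -- choices_ord[0]: choices_ord is nonempty here (the size-0 case returned above), so the default is never used
    let hd := choices_ord.headD (0, [])
    let first := PySem.List.maxD hd.2 (fun prog => prog.length) []
    pvExtractLoop first choices_ord

-- ===== PORT B =====
def extract_alt (chords : List String) : List String :=
  let grams := (PySem.List.pyRange 0 ((chords.length : Int) - 3) 1).map
      (fun i => PySem.List.slice chords (some i) (some (i + 4)))
  (grams.foldl
      (fun st g => if st.2 < (grams.count g : Int) then (g, (grams.count g : Int)) else st)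
      ([""], (1 : Int))).1

-- ===== PRECONDITION & SPEC =====
def Spec_extract (chords : List String) (out : List String) : Prop := out = extract_alt chords
instance (chords : List String) (out : List String) : Decidable (Spec_extract chords out) := by unfold Spec_extract; infer_instance

-- ===== CLAIM (what is proved, stated in full; the proofs are below) =====
def Claim_equal_extract : Prop := ∀ (chords : List String), Dom_extract chords → Spec_extract chords (extract chords)

-- ===== LEMMAS AND PROOFS =====

-- the list of consecutive 4-grams, and the common answer both programs compute
def pvW (l : List String) : List (List String) :=
  (List.range (l.length - 3)).map (fun k => (l.drop k).take 4)

def pvCnt (G : List (List String)) (g : List String) : Int := (G.count g : Int)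

-- first 4-gram whose multiplicity exceeds 1 and is maximal, else [""]
def pvSpecAns (G : List (List String)) : List String :=
  (G.find? (fun g => decide (1 < pvCnt G g) && decide (∀ h ∈ G, pvCnt G h ≤ pvCnt G g))).getD [""]

-- A's 'choices' dict, with the count>1 test as a filter and the insert written as modify (definitional)
def pvChoices (G : List (List String)) : PySem.Dict Int (List (List String)) :=
  ((PySem.Dict.counter G).items.filter (fun p => decide (1 < p.2))).foldl
    (fun ch p => ch.modify p.2 [] (fun v => v ++ [p.1])) PySem.Dict.empty

-- A's result as a function of the 4-gram list
def pvAnsA (G : List (List String)) : List String :=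
  if (pvChoices G).items.length = 0 then [""]
  else
    let choices_ord := PySem.List.sorted (pvChoices G).items (fun k => k.1) true
    let hd := choices_ord.headD (0, [])
    let first := PySem.List.maxD hd.2 (fun prog => prog.length) []
    pvExtractLoop first choices_ord

theorem pvZip4_eq (l : List String) :
    pvZip4 l (l.drop 1) (l.drop 2) (l.drop 3) = pvW l := by
  match l with
  | [] => rfl
  | [a] => rfl
  | [a, b] => rfl
  | [a, b, c] => rfl
  | a :: b :: c :: d :: t =>
    have ih := pvZip4_eq (b :: c :: d :: t)
    simp only [List.drop_succ_cons, List.drop_zero] at ih ⊢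
    show [a,b,c,d] :: pvZip4 (b::c::d::t) (c::d::t) (d::t) t = pvW (a::b::c::d::t)
    rw [ih]
    simp only [pvW, List.length_cons]
    have h1 : b::c::d::t = (b::c::d::t) := rfl
    have hlen : (t.length + 1 + 1 + 1 + 1) - 3 = ((t.length + 1 + 1 + 1) - 3) + 1 := by omega
    rw [hlen, List.range_succ_eq_map]
    simp [List.map_map, Function.comp]

theorem pvA_grams (chords : List String) :
    pvZip4 chords (PySem.List.slice chords (some 1) none)
      (PySem.List.slice chords (some 2) none) (PySem.List.slice chords (some 3) none)
      = pvW chords := by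
  rw [PySem.List.slice_from chords (by norm_num : (0:Int) ≤ 1),
      PySem.List.slice_from chords (by norm_num : (0:Int) ≤ 2),
      PySem.List.slice_from chords (by norm_num : (0:Int) ≤ 3)]
  exact pvZip4_eq chords

theorem pvB_grams (chords : List String) :
    (PySem.List.pyRange 0 ((chords.length : Int) - 3) 1).map
        (fun i => PySem.List.slice chords (some i) (some (i + 4))) = pvW chords := by
  rw [PySem.List.pyRange_one]
  rw [List.map_map]
  have h : ((chords.length : Int) - 3 - 0).toNat = chords.length - 3 := by omega
  rw [h]
  apply List.map_congr_left
  intro k hk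
  simp only [Function.comp_apply, zero_add]
  rw [PySem.List.slice_toNat chords (by positivity) (by positivity)]
  congr 1; omega

theorem pvW_len {l : List String} {g : List String} (h : g ∈ pvW l) : g.length = 4 := by
  simp only [pvW, List.mem_map, List.mem_range] at h
  obtain ⟨k, hk, rfl⟩ := h
  simp only [List.length_take, List.length_drop]
  omega

theorem pvFind?_congr_mem {α : Type} (l : List α) (p q : α → Bool)
    (h : ∀ x ∈ l, p x = q x) : l.find? p = l.find? q := by
  induction l with
  | nil => rfl
  | cons x t ih =>
    simp only [List.find?_cons]
    rw [h x (List.mem_cons_self)]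
    cases q x
    · exact ih (fun y hy => h y (List.mem_cons_of_mem _ hy))
    · rfl

theorem pvFind?_filter_sub {α : Type} (l : List α) (p q : α → Bool)
    (h : ∀ x ∈ l, p x = true → q x = true) : (l.filter q).find? p = l.find? p := by
  induction l with
  | nil => rfl
  | cons x t ih =>
    by_cases hq : q x = true
    · simp only [List.filter_cons, hq, if_true, List.find?_cons]
      cases hpx : p x
      · exact ih (fun y hy => h y (List.mem_cons_of_mem _ hy))
      · rfl
    · have hp : p x = false := by
        cases hpx : p x
        · rfl
        · exact absurd (h x List.mem_cons_self hpx) hq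
      simp only [List.filter_cons, hq, List.find?_cons, hp]
      exact ih (fun y hy => h y (List.mem_cons_of_mem _ hy))

theorem pvFind?_ofList {α : Type} [BEq α] [LawfulBEq α] (xs : List α) (p : α → Bool) :
    (PySem.Set.ofList xs).find? p = xs.find? p := by
  induction xs with
  | nil => rfl
  | cons x t ih =>
    rw [PySem.Set.ofList_cons]
    simp only [List.find?_cons]
    cases hpx : p x
    · rw [← ih]
      show ((PySem.Set.ofList t).filter (fun y => !y == x)).find? p = (PySem.Set.ofList t).find? p
      apply pvFind?_filter_sub
      intro y _ hpy
      simp only [Bool.not_eq_eq_eq_not, Bool.not_true, beq_eq_false_iff_ne]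
      rintro rfl
      rw [hpy] at hpx; exact Bool.false_ne_true hpx.symm
    · rfl

theorem pvExists_max {α : Type} (l : List α) (f : α → Int) (h : l ≠ []) :
    ∃ a ∈ l, ∀ b ∈ l, f b ≤ f a := by
  induction l with
  | nil => exact absurd rfl h
  | cons x t ih =>
    cases t with
    | nil => exact ⟨x, List.mem_cons_self, by simp⟩
    | cons y u =>
      obtain ⟨a, ha, hmax⟩ := ih (by simp)
      by_cases hxa : f x ≤ f a
      · refine ⟨a, List.mem_cons_of_mem _ ha, ?_⟩
        intro b hb
        rcases List.mem_cons.mp hb with rfl | hb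
        · exact hxa
        · exact hmax b hb
      · refine ⟨x, List.mem_cons_self, ?_⟩
        intro b hb
        rcases List.mem_cons.mp hb with rfl | hb
        · exact le_refl _
        · exact (hmax b hb).trans (by omega)

theorem pvFoldMax_stay (f : Option (List String) → List String → Option (List String))
    (hf : ∀ (m y : List String), y.length ≤ m.length → f (some m) y = some m)
    (t : List (List String)) (m : List String)
    (h : ∀ g ∈ t, g.length ≤ m.length) : t.foldl f (some m) = some m := by
  induction t with
  | nil => rfl
  | cons y u ih =>
    simp only [List.foldl_cons, hf m y (h y List.mem_cons_self)]
    exact ih (fun g hg => h g (List.mem_cons_of_mem _ hg))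

-- max(xs, key=len) over a nonempty list of equal-length elements is its first element
theorem pvMaxD_const (t : List (List String)) (x : List String)
    (h : ∀ g ∈ x :: t, g.length = 4) :
    PySem.List.maxD (x :: t) (fun prog => prog.length) [] = x := by
  simp only [PySem.List.maxD, PySem.List.max?, List.foldl_cons]
  rw [pvFoldMax_stay _ (fun m y hy => by simp [not_lt.mpr hy]) t x (fun g hg => by
    rw [h g (List.mem_cons_of_mem _ hg), h x List.mem_cons_self])]
  rfl

-- B's running-best loop returns the first element whose count is maximal and exceeds the initial best count
theorem pvFoldB (cnt : List String → Int) :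
    ∀ (r : List (List String)) (b0 : List String) (bc : Int),
    (r.foldl (fun st g => if st.2 < cnt g then (g, cnt g) else st) (b0, bc)).1
      = (r.find? (fun g => decide (bc < cnt g) && decide (∀ h ∈ r, cnt h ≤ cnt g))).getD b0 := by
  intro r
  induction r with
  | nil => intro b0 bc; rfl
  | cons x t ih =>
    intro b0 bc
    simp only [List.foldl_cons, List.find?_cons]
    by_cases hx : bc < cnt x
    · by_cases hmax : ∀ h ∈ t, cnt h ≤ cnt x
      · have hpx : (decide (bc < cnt x) && decide (∀ h ∈ x :: t, cnt h ≤ cnt x)) = true := by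
          simp only [Bool.and_eq_true, decide_eq_true_eq]
          exact ⟨hx, fun h hh => by rcases List.mem_cons.mp hh with rfl | hh
                                    · exact le_refl _
                                    · exact hmax h hh⟩
        rw [hpx]
        simp only [if_pos hx]
        rw [ih x (cnt x)]
        have : t.find? (fun g => decide (cnt x < cnt g) && decide (∀ h ∈ t, cnt h ≤ cnt g)) = none := by
          rw [List.find?_eq_none]
          intro g hg
          simp only [Bool.and_eq_true, decide_eq_true_eq, not_and]
          intro hlt
          exact absurd (hmax g hg) (not_le.mpr hlt)
        rw [this]; rfl
      · have hmax' : ∃ h0 ∈ t, cnt x < cnt h0 := by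
          by_contra hc
          exact hmax (fun h hh => not_lt.mp (fun hlt => hc ⟨h, hh, hlt⟩))
        obtain ⟨h0, hh0, hlt0⟩ := hmax'
        have hpx : (decide (bc < cnt x) && decide (∀ h ∈ x :: t, cnt h ≤ cnt x)) = false := by
          simp only [Bool.and_eq_false_iff, decide_eq_false_iff_not, not_forall]
          exact Or.inr ⟨h0, List.mem_cons_of_mem _ hh0, not_le.mpr hlt0⟩
        rw [hpx]
        simp only [if_pos hx]
        rw [ih x (cnt x)]
        have hcongr : t.find? (fun g => decide (cnt x < cnt g) && decide (∀ h ∈ t, cnt h ≤ cnt g))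
            = t.find? (fun g => decide (bc < cnt g) && decide (∀ h ∈ x :: t, cnt h ≤ cnt g)) := by
          apply pvFind?_congr_mem
          intro g _
          by_cases hall : ∀ h ∈ t, cnt h ≤ cnt g
          · have hxg : cnt x < cnt g := lt_of_lt_of_le hlt0 (hall h0 hh0)
            have h1 : (∀ h ∈ x :: t, cnt h ≤ cnt g) := by
              intro h hh
              rcases List.mem_cons.mp hh with rfl | hh
              · exact le_of_lt hxg
              · exact hall h hh
            simp [hxg, lt_trans hx hxg, h1]
          · have h1 : ¬ (∀ h ∈ x :: t, cnt h ≤ cnt g) := by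
              intro hc; exact hall (fun h hh => hc h (List.mem_cons_of_mem _ hh))
            simp [hall]
        rw [hcongr]
        -- both find?s are some: the max of the nonempty t qualifies
        obtain ⟨a, ha, hamax⟩ := pvExists_max t cnt (by rintro rfl; exact absurd hh0 (List.not_mem_nil))
        have : ∃ g ∈ t, (fun g => decide (bc < cnt g) && decide (∀ h ∈ x :: t, cnt h ≤ cnt g)) g = true := by
          refine ⟨a, ha, ?_⟩
          have hxa : cnt x < cnt a := lt_of_lt_of_le hlt0 (hamax h0 hh0)
          simp only [Bool.and_eq_true, decide_eq_true_eq]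
          refine ⟨lt_trans hx hxa, ?_⟩
          intro h hh
          rcases List.mem_cons.mp hh with rfl | hh
          · exact le_of_lt hxa
          · exact hamax h hh
        obtain ⟨w, hw⟩ := Option.isSome_iff_exists.mp (List.find?_isSome.mpr this)
        rw [hw]; rfl
    · have hpx : (decide (bc < cnt x) && decide (∀ h ∈ x :: t, cnt h ≤ cnt x)) = false := by
        simp [hx]
      rw [hpx]
      simp only [if_neg hx]
      rw [ih b0 bc]
      congr 1
      apply pvFind?_congr_mem
      intro g _
      by_cases hbc : bc < cnt g
      · by_cases hall : ∀ h ∈ t, cnt h ≤ cnt g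
        · have h1 : ∀ h ∈ x :: t, cnt h ≤ cnt g := by
            intro h hh
            rcases List.mem_cons.mp hh with rfl | hh
            · omega
            · exact hall h hh
          simp [hbc, h1]
        · have h1 : ¬ (∀ h ∈ x :: t, cnt h ≤ cnt g) := by
            intro hc; exact hall (fun h hh => hc h (List.mem_cons_of_mem _ hh))
          simp [hall]
      · simp [hbc]
theorem pvOfList_ne_nil {α : Type} [BEq α] [LawfulBEq α] {xs : List α} (h : xs ≠ []) :
    PySem.Set.ofList xs ≠ [] := by
  cases xs with
  | nil => exact absurd rfl h
  | cons x t => rw [PySem.Set.ofList_cons]; exact List.cons_ne_nil _ _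

-- keys of the grouping dict
theorem pvChoices_keys (G : List (List String)) :
    (pvChoices G).keys =
      PySem.Set.ofList ((((PySem.Dict.counter G).items.filter (fun p => decide (1 < p.2))).map (fun p => p.2))) := by
  have h := PySem.Dict.keys_foldl_modify_key
    (l := (PySem.Dict.counter G).items.filter (fun p => decide (1 < p.2)))
    (key := fun p => p.2) (d0 := ([] : List (List String)))
    (f := fun _ p v => v ++ [p.1]) (d := (PySem.Dict.empty : PySem.Dict Int (List (List String))))
  rw [PySem.Dict.keys_empty, PySem.Set.update_nil_left] at h
  exact h

theorem pvChoices_nodup (G : List (List String)) : (pvChoices G).keys.Nodup := by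
  exact PySem.Dict.nodup_keys_foldl_modify_key
    (l := (PySem.Dict.counter G).items.filter (fun p => decide (1 < p.2)))
    (key := fun p => p.2) (d0 := ([] : List (List String)))
    (f := fun _ p v => v ++ [p.1]) (d := (PySem.Dict.empty : PySem.Dict Int (List (List String))))
    PySem.Dict.nodup_keys_empty

theorem pvChoices_getD (G : List (List String)) (c : Int) (hc : 1 < c) :
    (pvChoices G).getD c [] = (PySem.Set.ofList G).filter (fun k => decide (pvCnt G k = c)) := by
  unfold pvChoices
  rw [show ((PySem.Dict.counter G).items.filter (fun p => decide (1 < p.2))).foldl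
        (fun ch p => ch.modify p.2 [] (fun v => v ++ [p.1])) PySem.Dict.empty
      = ((((PySem.Dict.counter G).items.filter (fun p => decide (1 < p.2))).map Prod.swap).foldl
        (fun ch p => ch.modify p.1 [] (fun v => v ++ [p.2])) PySem.Dict.empty) from by
      rw [List.foldl_map]
      rfl]
  rw [PySem.Dict.getD_foldl_modify_append]
  rw [PySem.Dict.getD_empty]
  simp only [List.nil_append, PySem.Dict.items_counter, List.filter_map, List.map_map]
  rw [List.filter_filter]
  simp only [Function.comp_def, Prod.swap_prod_mk]
  rw [List.map_id']
  apply List.filter_congr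
  intro k _
  by_cases hk : (List.count k G : Int) = c
  · simp [pvCnt, hk]
    omega
  · simp [pvCnt, hk]

theorem pvA_core (G : List (List String)) (hlen : ∀ g ∈ G, g.length = 4) :
    pvAnsA G = pvSpecAns G := by
  unfold pvAnsA
  by_cases hemp : (pvChoices G).items.length = 0
  · rw [if_pos hemp]
    -- no count exceeds 1, so B's find? comes up empty as well
    have hkeysnil : (pvChoices G).keys = [] := by
      show (pvChoices G).items.map Prod.fst = []
      rw [List.length_eq_zero_iff.mp hemp]; rfl
    have hfilnil : ((PySem.Dict.counter G).items.filter (fun p => decide (1 < p.2))) = [] := by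
      by_contra hne
      have := pvOfList_ne_nil (by
        intro hmapnil
        exact hne (List.map_eq_nil_iff.mp hmapnil) : ((PySem.Dict.counter G).items.filter (fun p => decide (1 < p.2))).map (fun p => p.2) ≠ [])
      rw [← pvChoices_keys] at this
      exact this hkeysnil
    have hcnt : ∀ g ∈ G, ¬ (1 < pvCnt G g) := by
      intro g hg hgt
      have hmem : ((g, pvCnt G g) : List String × Int) ∈ (PySem.Dict.counter G).items := by
        rw [PySem.Dict.items_counter]
        exact List.mem_map.mpr ⟨g, (PySem.Set.mem_ofList G g).mpr hg, rfl⟩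
      have : ((g, pvCnt G g) : List String × Int) ∈
          ((PySem.Dict.counter G).items.filter (fun p => decide (1 < p.2))) :=
        List.mem_filter.mpr ⟨hmem, by simpa using hgt⟩
      rw [hfilnil] at this
      exact absurd this (List.not_mem_nil)
    unfold pvSpecAns
    rw [List.find?_eq_none.mpr (by
      intro g hg
      simp only [Bool.and_eq_true, decide_eq_true_eq, not_and]
      intro h1
      exact absurd h1 (hcnt g hg))]
    rfl
  · rw [if_neg hemp]
    have hitems_ne : (pvChoices G).items ≠ [] := by
      intro h; exact hemp (by rw [h]; rfl)
    have hsne : PySem.List.sorted (pvChoices G).items (fun k => k.1) true ≠ [] := by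
      rw [Ne, PySem.List.sorted_eq_nil_iff]; exact hitems_ne
    obtain ⟨hd, tl, hcons⟩ := List.exists_cons_of_ne_nil hsne
    have hperm := PySem.List.sorted_perm (pvChoices G).items (fun k => k.1) true
    have hhdmem : hd ∈ (pvChoices G).items := hperm.mem_iff.mp (hcons ▸ List.mem_cons_self)
    have hub : ∀ e ∈ (pvChoices G).items, e.1 ≤ hd.1 := by
      intro e he
      have hes : e ∈ hd :: tl := hcons ▸ hperm.mem_iff.mpr he
      rcases List.mem_cons.mp hes with rfl | het
      · exact le_refl _
      · have hpw := PySem.List.sorted_pairwise_rev (pvChoices G).items (fun k => k.1)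
        rw [hcons] at hpw
        exact (List.pairwise_cons.mp hpw).1 e het
    obtain ⟨c₀, ps⟩ := hd
    have hkey : c₀ ∈ (pvChoices G).keys := by
      show c₀ ∈ (pvChoices G).items.map Prod.fst
      exact List.mem_map.mpr ⟨(c₀, ps), hhdmem, rfl⟩
    rw [pvChoices_keys] at hkey
    obtain ⟨p, hpfil, hp2⟩ := List.mem_map.mp ((PySem.Set.mem_ofList _ _).mp hkey)
    have hpmem := (List.mem_filter.mp hpfil).1
    have hpgt : 1 < p.2 := by
      have := (List.mem_filter.mp hpfil).2; simpa using this
    rw [PySem.Dict.items_counter] at hpmem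
    obtain ⟨k, hkG, hkp⟩ := List.mem_map.mp hpmem
    have hkcnt : pvCnt G k = c₀ := by rw [← hp2, ← hkp]; rfl
    have hkGmem : k ∈ G := (PySem.Set.mem_ofList G k).mp hkG
    have h1c : 1 < c₀ := hp2 ▸ hpgt
    have hmax : ∀ g ∈ G, pvCnt G g ≤ c₀ := by
      intro g hg
      by_cases hgt : 1 < pvCnt G g
      · have hmemit : ((g, pvCnt G g) : List String × Int) ∈ (PySem.Dict.counter G).items := by
          rw [PySem.Dict.items_counter]
          exact List.mem_map.mpr ⟨g, (PySem.Set.mem_ofList G g).mpr hg, rfl⟩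
        have hfil : ((g, pvCnt G g) : List String × Int) ∈
            ((PySem.Dict.counter G).items.filter (fun p => decide (1 < p.2))) :=
          List.mem_filter.mpr ⟨hmemit, by simpa using hgt⟩
        have hkey2 : pvCnt G g ∈ (pvChoices G).keys := by
          rw [pvChoices_keys]
          exact (PySem.Set.mem_ofList _ _).mpr (List.mem_map.mpr ⟨_, hfil, rfl⟩)
        obtain ⟨e, he, he1⟩ := List.mem_map.mp (hkey2 : _ ∈ (pvChoices G).items.map Prod.fst)
        rw [← he1]
        exact hub e he
      · have : pvCnt G g ≤ 1 := not_lt.mp hgt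
        omega
    have hps : ps = (PySem.Set.ofList G).filter (fun k => decide (pvCnt G k = c₀)) := by
      rw [← pvChoices_getD G c₀ h1c]
      exact (PySem.Dict.getD_of_mem_items _ hhdmem (pvChoices_nodup G) []).symm
    have hpsne : ps ≠ [] := by
      rw [hps]
      intro hnil
      have hkin : k ∈ (PySem.Set.ofList G).filter (fun k => decide (pvCnt G k = c₀)) :=
        List.mem_filter.mpr ⟨hkG, by simp [hkcnt]⟩
      rw [hnil] at hkin
      exact absurd hkin (List.not_mem_nil)
    obtain ⟨h₂, t₂, hps2⟩ := List.exists_cons_of_ne_nil hpsne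
    have hlen2 : ∀ g ∈ h₂ :: t₂, g.length = 4 := by
      intro g hg
      rw [← hps2, hps] at hg
      exact hlen g ((PySem.Set.mem_ofList _ _).mp (List.mem_filter.mp hg).1)
    -- the A side returns h₂, the head of the maximal-count group
    have hA : (let choices_ord := PySem.List.sorted (pvChoices G).items (fun k => k.1) true
               let hd := choices_ord.headD (0, [])
               let first := PySem.List.maxD hd.2 (fun prog => prog.length) []
               pvExtractLoop first choices_ord) = h₂ := by
      simp only [hcons, List.headD_cons]
      show pvExtractLoop _ ((c₀, ps) :: tl) = h₂
      unfold pvExtractLoop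
      simp only [hps2]
      rw [pvMaxD_const t₂ h₂ hlen2]
      rw [if_pos (by rw [hlen2 h₂ List.mem_cons_self]; omega)]
    rw [hA]
    -- and so does the single-scan spec
    unfold pvSpecAns
    rw [pvFind?_congr_mem G _ (fun g => decide (pvCnt G g = c₀)) ?hpoint]
    case hpoint =>
      intro g hg
      by_cases heq : pvCnt G g = c₀
      · have hgt1 : 1 < pvCnt G g := heq ▸ h1c
        have hall : ∀ h ∈ G, pvCnt G h ≤ pvCnt G g := fun h hh => heq ▸ hmax h hh
        simp only [heq]
        simp
        exact ⟨h1c, hmax⟩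
      · by_cases hall : ∀ h ∈ G, pvCnt G h ≤ pvCnt G g
        · have hge : c₀ ≤ pvCnt G g := hkcnt ▸ hall k hkGmem
          exact absurd (le_antisymm (hmax g hg) hge) heq
        · simp [hall, heq]
    rw [← List.head?_filter]
    have hh : (G.filter (fun g => decide (pvCnt G g = c₀))).head? = some h₂ := by
      rw [List.head?_filter, ← pvFind?_ofList, ← List.head?_filter, ← hps, hps2]
      rfl
    rw [hh]
    rfl

theorem pvA_eq (chords : List String) : extract chords = pvAnsA (pvW chords) := by
  unfold extract pvAnsA pvChoices
  simp only [pvA_grams, PySem.Dict.foldl_insert_getD_add_one_eq_counter,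
    PySem.List.foldl_ite_eq_foldl_filter (fun (p : List String × Int) => 1 < p.2)]
  rfl

theorem pvB_core (chords : List String) : extract_alt chords = pvSpecAns (pvW chords) := by
  unfold extract_alt
  simp only [pvB_grams]
  exact pvFoldB (pvCnt (pvW chords)) (pvW chords) [""] 1

-- ===== VERDICT (by name: the statement is the Claim_ definition above) =====
theorem extract_spec : Claim_equal_extract := by
  intro chords _
  unfold Spec_extract
  rw [pvA_eq chords, pvB_core chords]
  exact pvA_core (pvW chords) (fun g hg => pvW_len hg)
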